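-- pv_equiv track=rewrite | github.com/srinivasuk/sd-mqtt-printer-client | src/utils/bitmap.py | create_test_bitmap
-- ===== SOURCE A (Python) =====
-- from typing import List, Tuple
--
-- def encode_pixel_array_to_bitmap(pixels: List[int], width: int, height: int) -> List[int]:
--     """
--     Encode pixel array to bit-packed bitmap data.
--
--     Args:
--         pixels: List of pixel values (0=black, 255=white)
--         width: Bitmap width in pixels
--         height: Bitmap height in pixels
--
--     Returns:
--         Bit-packed bitmap data
--     """
--     bytes_per_row = (width + 7) // 8
--     bitmap_data = [0] * (bytes_per_row * height)
--
--     for y in range(height):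
--         for x in range(width):
--             pixel_index = y * width + x
--             if pixel_index < len(pixels):
--                 is_black = pixels[pixel_index] < 128  # Threshold at 128
--
--                 if is_black:
--                     byte_index = y * bytes_per_row + (x // 8)
--                     bit_index = 7 - (x % 8)  # MSB first
--                     bitmap_data[byte_index] |= (1 << bit_index)
--
--     return bitmap_data
--
-- def create_test_bitmap(width: int = 64, height: int = 64) -> List[int]:
--     """
--     Create a test bitmap pattern for debugging.
--
--     Args:
--         width: Bitmap width
--         height: Bitmap height
--
--     Returns:
--         Test bitmap data
--     """
--     pixels = []
--
--     for y in range(height):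
--         for x in range(width):
--             # Create a simple test pattern
--             is_black = False
--
--             # Border
--             if x == 0 or x == width-1 or y == 0 or y == height-1:
--                 is_black = True
--             # Diagonal lines
--             elif x == y or x == (width - 1 - y):
--                 is_black = True
--             # Checkerboard in center
--             elif (width//4 < x < 3*width//4) and (height//4 < y < 3*height//4):
--                 is_black = ((x // 4) + (y // 4)) % 2 == 0
--
--             pixels.append(0 if is_black else 255)
--
--     return encode_pixel_array_to_bitmap(pixels, width, height)
-- ===== SOURCE B (Python) =====
-- from typing import List
--
-- def _is_black(x: int, y: int, width: int, height: int) -> bool: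
--     if x == 0 or x == width - 1 or y == 0 or y == height - 1:
--         return True
--     if x == y or x == (width - 1 - y):
--         return True
--     if (width // 4 < x < 3 * width // 4) and (height // 4 < y < 3 * height // 4):
--         return ((x // 4) + (y // 4)) % 2 == 0
--     return False
--
-- def create_test_bitmap(width: int = 64, height: int = 64) -> List[int]:
--     bytes_per_row = (width + 7) // 8
--     out = []
--     for y in range(height):
--         for b in range(bytes_per_row):
--             byte = 0
--             for i in range(8):
--                 x = 8 * b + i
--                 if x < width and _is_black(x, y, width, height):
--                     byte |= 1 << (7 - i)
--             out.append(byte)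
--     return out
-- ===== Notes on version B (the rewrite author's own statement) =====
-- stated objective: simpler
-- what changed: B fuses generation and packing into one pass that assembles each output byte directly (per-byte inner loop over its 8 bits), eliminating the intermediate width*height pixel list, the zero-filled buffer with |= mutation, and the len-guard of encode_pixel_array_to_bitmap.
-- intended difference: On width <= -8 and height <= -1, A returns a nonempty list of zeros (its (width+7)//8 * height buffer allocation is positive while both loops run zero times); B returns [], the intended result since no bitmap exists for negative dimensions. — e.g. on create_test_bitmap(-9, -2): A returns [0, 0], B returns []
import Mathlib
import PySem

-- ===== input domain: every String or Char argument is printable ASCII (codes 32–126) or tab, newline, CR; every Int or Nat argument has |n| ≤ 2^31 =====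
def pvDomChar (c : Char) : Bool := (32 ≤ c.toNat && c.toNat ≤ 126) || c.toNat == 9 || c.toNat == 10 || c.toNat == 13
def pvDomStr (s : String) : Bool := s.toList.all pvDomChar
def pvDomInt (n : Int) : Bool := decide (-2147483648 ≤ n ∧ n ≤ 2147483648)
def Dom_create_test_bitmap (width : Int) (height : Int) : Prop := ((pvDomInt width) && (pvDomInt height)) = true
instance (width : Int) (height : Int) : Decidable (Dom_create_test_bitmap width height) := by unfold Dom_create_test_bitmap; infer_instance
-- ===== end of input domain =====

-- B fuses pixel generation and bit-packing into one pass that assembles each output byte directly,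
-- eliminating the intermediate pixel list; on the degenerate corner width ≤ -8 ∧ height ≤ -1 A returns
-- a nonempty all-zero buffer (leftover of its negative-size allocation) while B returns [] (see D_ below).


-- ===== PORT A =====
def encode_pixel_array_to_bitmap (pixels : List Int) (width : Int) (height : Int) : List Int :=
  let bytes_per_row := PySem.Int.floordiv (width + 7) 8
  let bitmap_data := PySem.List.pyRepeat [(0 : Int)] (bytes_per_row * height)
  (PySem.List.pyRange 0 height 1).foldl (fun bitmap_data y =>
    (PySem.List.pyRange 0 width 1).foldl (fun bitmap_data x =>
      let pixel_index := y * width + x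
      if pixel_index < (pixels.length : Int) then
        let is_black := PySem.List.pyGetD pixels pixel_index 0 < 128
        if is_black then
          let byte_index := y * bytes_per_row + PySem.Int.floordiv x 8
          let bit_index := 7 - PySem.Int.mod x 8
          -- bit_index ∈ [0,7] whenever this branch runs, so `.toNat` is exact for Python's `1 << bit_index`
          PySem.List.pySetD bitmap_data byte_index
            (PySem.Int.bor (PySem.List.pyGetD bitmap_data byte_index 0) ((1 : Int) <<< bit_index.toNat))
        else bitmap_data
      else bitmap_data) bitmap_data) bitmap_data

def create_test_bitmap (width : Int) (height : Int) : List Int :=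
  let pixels := (PySem.List.pyRange 0 height 1).foldl (fun pixels y =>
    (PySem.List.pyRange 0 width 1).foldl (fun pixels x =>
      let is_black : Bool :=
        if x = 0 ∨ x = width - 1 ∨ y = 0 ∨ y = height - 1 then true
        else if x = y ∨ x = width - 1 - y then true
        else if (PySem.Int.floordiv width 4 < x ∧ x < PySem.Int.floordiv (3 * width) 4) ∧
                (PySem.Int.floordiv height 4 < y ∧ y < PySem.Int.floordiv (3 * height) 4) then
          decide (PySem.Int.mod (PySem.Int.floordiv x 4 + PySem.Int.floordiv y 4) 2 = 0)
        else false
      pixels ++ [if is_black then (0 : Int) else 255]) pixels) []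
  encode_pixel_array_to_bitmap pixels width height

-- ===== PORT B =====
def pvIsBlack (x : Int) (y : Int) (width : Int) (height : Int) : Bool :=
  if x = 0 ∨ x = width - 1 ∨ y = 0 ∨ y = height - 1 then true
  else if x = y ∨ x = width - 1 - y then true
  else if (PySem.Int.floordiv width 4 < x ∧ x < PySem.Int.floordiv (3 * width) 4) ∧
          (PySem.Int.floordiv height 4 < y ∧ y < PySem.Int.floordiv (3 * height) 4) then
    decide (PySem.Int.mod (PySem.Int.floordiv x 4 + PySem.Int.floordiv y 4) 2 = 0)
  else false

def create_test_bitmap_alt (width : Int) (height : Int) : List Int :=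
  let bytes_per_row := PySem.Int.floordiv (width + 7) 8
  (PySem.List.pyRange 0 height 1).foldl (fun out y =>
    (PySem.List.pyRange 0 bytes_per_row 1).foldl (fun out b =>
      let byte := (PySem.List.pyRange 0 8 1).foldl (fun byte i =>
        let x := 8 * b + i
        if x < width ∧ pvIsBlack x y width height = true then
          -- i ∈ [0,7] inside this loop, so `.toNat` is exact for Python's `1 << (7 - i)`
          PySem.Int.bor byte ((1 : Int) <<< (7 - i).toNat)
        else byte) 0
      out ++ [byte]) out) []

-- ===== PRECONDITION & SPEC =====
-- On width ≤ -8 and height ≤ -1, A returns a nonempty list of zeros (its buffer allocation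
-- (width+7)//8 * height is positive while both loops are empty) although no bitmap exists for
-- negative dimensions; B returns the intended empty list.
def D_create_test_bitmap (width : Int) (height : Int) : Prop := width ≤ -8 ∧ height ≤ -1
instance (width : Int) (height : Int) : Decidable (D_create_test_bitmap width height) := by unfold D_create_test_bitmap; infer_instance

def Spec_create_test_bitmap (width : Int) (height : Int) (out : List Int) : Prop :=
  ¬ D_create_test_bitmap width height → out = create_test_bitmap_alt width height
instance (width : Int) (height : Int) (out : List Int) : Decidable (Spec_create_test_bitmap width height out) := by unfold Spec_create_test_bitmap; infer_instance

def pvDiffWitness_create_test_bitmap : Int × Int := (-9, -2)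
def pvDiffWitnessOut_create_test_bitmap : (List Int) × (List Int) := ([0, 0], [])

-- ===== CLAIM (what is proved, stated in full; the proofs are below) =====
def Claim_unchanged_create_test_bitmap : Prop := ∀ (width : Int) (height : Int), Dom_create_test_bitmap width height → Spec_create_test_bitmap width height (create_test_bitmap width height)
def Claim_changed_create_test_bitmap : Prop := Dom_create_test_bitmap (pvDiffWitness_create_test_bitmap.1) (pvDiffWitness_create_test_bitmap.2) ∧ D_create_test_bitmap (pvDiffWitness_create_test_bitmap.1) (pvDiffWitness_create_test_bitmap.2) ∧ create_test_bitmap (pvDiffWitness_create_test_bitmap.1) (pvDiffWitness_create_test_bitmap.2) = pvDiffWitnessOut_create_test_bitmap.1 ∧ create_test_bitmap_alt (pvDiffWitness_create_test_bitmap.1) (pvDiffWitness_create_test_bitmap.2) = pvDiffWitnessOut_create_test_bitmap.2 ∧ pvDiffWitnessOut_create_test_bitmap.1 ≠ pvDiffWitnessOut_create_test_bitmap.2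
def Claim_exact_create_test_bitmap : Prop := ∀ (width : Int) (height : Int), Dom_create_test_bitmap width height → D_create_test_bitmap width height → create_test_bitmap width height ≠ create_test_bitmap_alt width height

-- ===== LEMMAS AND PROOFS =====

lemma pv_foldl_id (c : Nat → Bool) (g : Nat → Int → Int) :
    ∀ (l : List Nat) (v : Int), (∀ x ∈ l, c x = false) →
    l.foldl (fun v x => if c x then g x v else v) v = v := by
  intro l
  induction l with
  | nil => intro v _; rfl
  | cons a l ih =>
    intro v h
    simp only [List.foldl_cons, h a (List.mem_cons_self), if_neg Bool.false_ne_true]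
    exact ih v (fun x hx => h x (List.mem_cons_of_mem _ hx))

lemma pv_chunk (idx : Nat → Nat) (c : Nat → Bool) (upd : Nat → Int → Int) :
    ∀ (n s : Nat) (P T : List Int) (v : Int), (∀ j, j < n → idx (s + j) = P.length) →
    (List.range' s n).foldl
      (fun L x => if c x then L.set (idx x) (upd x (L.getD (idx x) 0)) else L) (P ++ v :: T)
    = P ++ ((List.range' s n).foldl (fun v x => if c x then upd x v else v) v) :: T := by
  intro n
  induction n with
  | zero => intro s P T v _; rfl
  | succ n ih =>
    intro s P T v h
    have hs : idx s = P.length := by simpa using h 0 (Nat.succ_pos n)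
    have hget : (P ++ v :: T).getD (idx s) 0 = v := by simp [hs]
    have hset : ∀ u, (P ++ v :: T).set (idx s) u = P ++ u :: T := by intro u; simp [hs]
    have h' : ∀ j, j < n → idx (s + 1 + j) = P.length := by
      intro j hj
      have := h (j + 1) (by omega)
      simpa [Nat.add_assoc, Nat.add_comm 1 j] using this
    rw [List.range'_succ]
    simp only [List.foldl_cons]
    by_cases hc : c s
    · rw [if_pos hc, if_pos hc, hget, hset, ih (s+1) P T (upd s v) h']
    · rw [if_neg hc, if_neg hc, ih (s+1) P T v h']

lemma pv_row (c : Nat → Bool) (upd : Nat → Int → Int) :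
    ∀ (bpr Wn : Nat), Wn ≤ 8 * bpr → 8 * bpr < Wn + 8 →
    ∀ (P T : List Int),
    (List.range Wn).foldl
      (fun L x => if c x then L.set (P.length + x / 8) (upd x (L.getD (P.length + x / 8) 0)) else L)
      (P ++ List.replicate bpr 0 ++ T)
    = P ++ (List.range bpr).map (fun b =>
        (List.range 8).foldl (fun v i =>
          if decide (8 * b + i < Wn) && c (8 * b + i) then upd (8 * b + i) v else v) 0) ++ T := by
  intro bpr
  induction bpr with
  | zero =>
    intro Wn hW _ P T
    have : Wn = 0 := by omega
    subst this
    simp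
  | succ bpr ih =>
    intro Wn hW hW2 P T
    set k := Wn - 8 * bpr with hk
    have hk1 : 1 ≤ k := by omega
    have hk8 : k ≤ 8 := by omega
    have hsplit : List.range Wn = List.range (8 * bpr) ++ List.range' (8 * bpr) k := by
      rw [List.range_eq_range', List.range_eq_range']
      have : List.range' 0 (8 * bpr) ++ List.range' (0 + 1 * (8 * bpr)) k = List.range' 0 (8 * bpr + k) :=
        List.range'_append
      rw [show Wn = 8 * bpr + k by omega]
      rw [← this]
      norm_num
    rw [hsplit, List.foldl_append]
    have hinit : P ++ List.replicate (bpr + 1) 0 ++ T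
        = P ++ List.replicate bpr 0 ++ ((0 : Int) :: T) := by
      simp [List.replicate_succ', List.append_assoc]
    rw [hinit, ih (8 * bpr) (le_refl _) (by omega) P ((0 : Int) :: T)]
    -- now the second chunk: all indices are P.length + bpr
    have hlen : (P ++ (List.range bpr).map (fun b =>
        (List.range 8).foldl (fun v i =>
          if decide (8 * b + i < 8 * bpr) && c (8 * b + i) then upd (8 * b + i) v else v) 0)).length
        = P.length + bpr := by simp
    rw [show P ++ (List.range bpr).map (fun b =>
        (List.range 8).foldl (fun v i =>
          if decide (8 * b + i < 8 * bpr) && c (8 * b + i) then upd (8 * b + i) v else v) 0) ++ ((0:Int) :: T)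
      = (P ++ (List.range bpr).map (fun b =>
        (List.range 8).foldl (fun v i =>
          if decide (8 * b + i < 8 * bpr) && c (8 * b + i) then upd (8 * b + i) v else v) 0)) ++ ((0:Int) :: T) by simp [List.append_assoc]]
    rw [pv_chunk (fun x => P.length + x / 8) c upd k (8 * bpr) _ T 0
      (by intro j hj; rw [hlen]; have : (8 * bpr + j) / 8 = bpr := by omega
          simp [this])]
    rw [show List.range (bpr+1) = List.range bpr ++ [bpr] from List.range_succ, List.map_append]
    have hmapeq : (List.range bpr).map (fun b =>
        (List.range 8).foldl (fun v i =>
          if decide (8 * b + i < 8 * bpr) && c (8 * b + i) then upd (8 * b + i) v else v) 0)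
      = (List.range bpr).map (fun b =>
        (List.range 8).foldl (fun v i =>
          if decide (8 * b + i < Wn) && c (8 * b + i) then upd (8 * b + i) v else v) 0) := by
      apply List.map_congr_left
      intro b hb
      rw [List.mem_range] at hb
      apply PySem.List.foldl_congr_mem
      intro acc i hi
      rw [List.mem_range] at hi
      have h1 : 8 * b + i < 8 * bpr := by omega
      rw [decide_eq_true h1, decide_eq_true (show 8 * b + i < Wn by omega)]
    have hchunk : (List.range' (8 * bpr) k).foldl (fun v x => if c x then upd x v else v) 0
      = (List.range 8).foldl (fun v i =>
          if decide (8 * bpr + i < Wn) && c (8 * bpr + i) then upd (8 * bpr + i) v else v) 0 := by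
      have h8 : List.range 8 = List.range k ++ List.range' k (8 - k) := by
        rw [List.range_eq_range']
        have : List.range' 0 k ++ List.range' (0 + 1 * k) (8 - k) = List.range' 0 (k + (8 - k)) :=
          List.range'_append
        rw [show (8 : Nat) = k + (8 - k) by omega, ← this, List.range_eq_range']
        norm_num
      rw [h8, List.foldl_append]
      rw [pv_foldl_id (fun i => decide (8 * bpr + i < Wn) && c (8 * bpr + i))
        (fun i v => upd (8 * bpr + i) v) (List.range' k (8 - k)) _
        (by intro i hi
            have := List.mem_range'_1.mp hi
            have : ¬ (8 * bpr + i < Wn) := by omega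
            simp [this])]
      rw [List.range'_eq_map_range, List.foldl_map]
      apply PySem.List.foldl_congr_mem
      intro acc i hi
      rw [List.mem_range] at hi
      rw [decide_eq_true (show 8 * bpr + i < Wn by omega)]
      simp
    rw [hmapeq, hchunk]
    simp [List.append_assoc]

lemma pv_rows (c : Nat → Nat → Bool) (upd : Nat → Nat → Int → Int) (bpr Wn : Nat)
    (h1 : Wn ≤ 8 * bpr) (h2 : 8 * bpr < Wn + 8) :
    ∀ (h y0 : Nat) (P T : List Int), P.length = y0 * bpr →
    (List.range' y0 h).foldl (fun L y =>
      (List.range Wn).foldl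
        (fun L x => if c y x then L.set (y * bpr + x / 8) (upd y x (L.getD (y * bpr + x / 8) 0)) else L) L)
      (P ++ List.replicate (bpr * h) 0 ++ T)
    = P ++ (List.range' y0 h).flatMap (fun y => (List.range bpr).map (fun b =>
        (List.range 8).foldl (fun v i =>
          if decide (8 * b + i < Wn) && c y (8 * b + i) then upd y (8 * b + i) v else v) 0)) ++ T := by
  intro h
  induction h with
  | zero => intro y0 P T _; simp
  | succ h ih =>
    intro y0 P T hP
    rw [List.range'_succ, List.foldl_cons]
    have hrep : P ++ List.replicate (bpr * (h + 1)) 0 ++ T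
        = P ++ List.replicate bpr 0 ++ (List.replicate (bpr * h) 0 ++ T) := by
      rw [show bpr * (h + 1) = bpr + bpr * h by ring, List.replicate_add,
        List.append_assoc, List.append_assoc, List.append_assoc]
    rw [hrep]
    have hrow := pv_row (c y0) (upd y0) bpr Wn h1 h2 P (List.replicate (bpr * h) 0 ++ T)
    rw [hP] at hrow
    rw [hrow]
    set rowmap := (List.range bpr).map (fun b =>
        (List.range 8).foldl (fun v i =>
          if decide (8 * b + i < Wn) && c y0 (8 * b + i) then upd y0 (8 * b + i) v else v) 0) with hrm
    have hP' : (P ++ rowmap).length = (y0 + 1) * bpr := by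
      simp [hrm, hP]; ring
    rw [show P ++ rowmap ++ (List.replicate (bpr * h) 0 ++ T)
        = (P ++ rowmap) ++ List.replicate (bpr * h) 0 ++ T by simp [List.append_assoc]]
    rw [ih (y0 + 1) (P ++ rowmap) T hP']
    simp only [List.flatMap_cons, List.append_assoc, hrm]

lemma pv_foldl_const {α β : Type} : ∀ (l : List α) (init : β),
    l.foldl (fun acc _ => acc) init = init := by
  intro l
  induction l with
  | nil => intro init; rfl
  | cons a l ih => intro init; simp only [List.foldl_cons]; exact ih init

lemma pv_length_grid (W : Nat) (g : Nat → Nat → Int) : ∀ (l : List Nat),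
    (l.flatMap (fun y => (List.range W).map (fun x => g x y))).length = l.length * W := by
  intro l
  induction l with
  | nil => simp
  | cons a l ih => simp [ih]; ring

lemma pv_getD_grid (W : Nat) (g : Nat → Nat → Int) : ∀ (H y x : Nat), y < H → x < W →
    ((List.range H).flatMap (fun yy => (List.range W).map (fun xx => g xx yy))).getD (y * W + x) 0
    = g x y := by
  intro H y x hy hx
  have hsplit : List.range H = List.range y ++ (List.range (H - y)).map (fun i => y + i) := by
    have h2 : List.range (y + (H - y)) = List.range y ++ (List.range (H - y)).map (fun i => y + i) :=
      List.range_add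
    rwa [show y + (H - y) = H by omega] at h2
  rw [hsplit, List.flatMap_append]
  rw [List.getD_append_right _ _ _ _ (by rw [pv_length_grid]; simp)]
  rw [pv_length_grid]
  simp only [List.length_range]
  have hidx : y * W + x - y * W = x := by omega
  rw [hidx]
  have hH : H - y = (H - y - 1) + 1 := by omega
  rw [hH, List.range_succ_eq_map]
  simp only [List.map_cons, List.flatMap_cons, Nat.add_zero]
  rw [List.getD_append _ _ _ _ (by simpa using hx)]
  rw [List.getD_eq_getElem _ _ (by simpa using hx)]
  simp

lemma pv_pix_lt (b : Bool) : ((if b then (0 : Int) else 255) < 128) ↔ b = true := by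
  cases b <;> norm_num


-- Proof-side abbreviations: the common pattern bit, bit update, per-byte value and full output.
def pvP (width height : Int) (y x : Nat) : Bool := pvIsBlack (x : Int) (y : Int) width height
def pvU (x : Nat) (v : Int) : Int := PySem.Int.bor v ((1 : Int) <<< (7 - x % 8))
def pvByte (width height : Int) (Wn : Nat) (y b : Nat) : Int :=
  (List.range 8).foldl (fun v i =>
    if decide (8 * b + i < Wn) && pvP width height y (8 * b + i) then pvU (8 * b + i) v else v) 0
def pvOut (width height : Int) (Wn Hn bpr : Nat) : List Int :=
  (List.range Hn).flatMap (fun y => (List.range bpr).map (pvByte width height Wn y))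

-- A's first pass builds exactly the rectangular pixel grid of the pattern.
lemma pv_A_pixels (Wn Hn : Nat) :
    (PySem.List.pyRange 0 (Hn : Int) 1).foldl (fun pixels y =>
      (PySem.List.pyRange 0 (Wn : Int) 1).foldl (fun pixels x =>
        let is_black : Bool :=
          if x = 0 ∨ x = (Wn : Int) - 1 ∨ y = 0 ∨ y = (Hn : Int) - 1 then true
          else if x = y ∨ x = (Wn : Int) - 1 - y then true
          else if (PySem.Int.floordiv (Wn : Int) 4 < x ∧ x < PySem.Int.floordiv (3 * (Wn : Int)) 4) ∧
                  (PySem.Int.floordiv (Hn : Int) 4 < y ∧ y < PySem.Int.floordiv (3 * (Hn : Int)) 4) then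
            decide (PySem.Int.mod (PySem.Int.floordiv x 4 + PySem.Int.floordiv y 4) 2 = 0)
          else false
        pixels ++ [if is_black then (0 : Int) else 255]) pixels) []
    = (List.range Hn).flatMap (fun y => (List.range Wn).map
        (fun x => if pvP (Wn : Int) (Hn : Int) y x then (0 : Int) else 255)) := by
  simp only [PySem.List.pyRange_zero_natCast, List.foldl_map]
  rw [PySem.List.foldl_congr_mem (List.range Hn) _
    (fun (pixels : List Int) (y : Nat) => pixels ++ (List.range Wn).map
      (fun x => if pvP (Wn : Int) (Hn : Int) y x then (0 : Int) else 255)) []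
    (by
      intro acc y _
      exact PySem.List.foldl_append_singleton_eq_map _ _ _)]
  rw [PySem.List.foldl_append_eq_flatMap]
  rfl

-- A's second pass, applied to the pixel grid, packs it into the canonical byte grid.
lemma pv_A_encode (Wn Hn : Nat) :
    encode_pixel_array_to_bitmap
      ((List.range Hn).flatMap (fun y => (List.range Wn).map
        (fun x => if pvP (Wn : Int) (Hn : Int) y x then (0 : Int) else 255)))
      (Wn : Int) (Hn : Int)
    = pvOut (Wn : Int) (Hn : Int) Wn Hn ((Wn + 7) / 8) := by
  have h8 : (8 : Int) = ((8 : Nat) : Int) := by norm_num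
  have hbpr : PySem.Int.floordiv ((Wn : Int) + 7) ((8 : Nat) : Int) = (((Wn + 7) / 8 : Nat) : Int) := by
    rw [show ((Wn : Int) + 7) = ((Wn + 7 : Nat) : Int) by push_cast; ring,
      PySem.Int.floordiv_natCast]
  unfold encode_pixel_array_to_bitmap
  simp only [h8, hbpr, PySem.List.pyRange_zero_natCast, List.foldl_map,
    PySem.List.pyRepeat_singleton, pv_length_grid, List.length_range]
  rw [show (((((Wn + 7) / 8 : Nat) : Int)) * ((Hn : Nat) : Int)).toNat = ((Wn + 7) / 8) * Hn by
    rw [← Nat.cast_mul, Int.toNat_natCast]]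
  rw [PySem.List.foldl_congr_mem (List.range Hn) _
    (fun (L : List Int) (y : Nat) => (List.range Wn).foldl
      (fun L x => if pvP (Wn : Int) (Hn : Int) y x = true then
        L.set (y * ((Wn + 7) / 8) + x / 8) (pvU x (L.getD (y * ((Wn + 7) / 8) + x / 8) 0))
      else L) L) _
    (by
      intro L y hy
      rw [List.mem_range] at hy
      apply PySem.List.foldl_congr_mem
      intro L2 x hx
      rw [List.mem_range] at hx
      have hidx : ((y : Int)) * ((Wn : Nat) : Int) + ((x : Nat) : Int) = ((y * Wn + x : Nat) : Int) := by
        push_cast; ring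
      rw [hidx]
      rw [if_pos (show ((y * Wn + x : Nat) : Int) < ((Hn * Wn : Nat) : Int) by
        exact_mod_cast show y * Wn + x < Hn * Wn from by
          calc y * Wn + x < y * Wn + Wn := by omega
            _ = (y + 1) * Wn := by ring
            _ ≤ Hn * Wn := Nat.mul_le_mul_right _ (by omega))]
      rw [PySem.List.pyGetD_natCast]
      rw [pv_getD_grid Wn _ Hn y x hy hx]
      simp only [pv_pix_lt]
      rw [PySem.Int.floordiv_natCast, PySem.Int.mod_natCast]
      have hbi : ((y : Nat) : Int) * (((Wn + 7) / 8 : Nat) : Int) + ((x / 8 : Nat) : Int)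
          = ((y * ((Wn + 7) / 8) + x / 8 : Nat) : Int) := by push_cast; ring
      rw [hbi, PySem.List.pySetD_natCast, PySem.List.pyGetD_natCast]
      have ht : ((7 : Int) - ((x % 8 : Nat) : Int)).toNat = 7 - x % 8 := by omega
      rw [ht]
      rfl)]
  have hrows := pv_rows (fun y x => pvP (Wn : Int) (Hn : Int) y x) (fun _ x v => pvU x v)
    ((Wn + 7) / 8) Wn (by omega) (by omega) Hn 0 [] [] (by simp)
  simp only [List.nil_append, List.append_nil] at hrows
  rw [show List.range' 0 Hn = List.range Hn from (List.range_eq_range').symm] at hrows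
  rw [hrows]
  rfl

-- A computes the canonical grid of bytes (positive dimensions).
lemma pv_A (Wn Hn : Nat) :
    create_test_bitmap (Wn : Int) (Hn : Int)
    = pvOut (Wn : Int) (Hn : Int) Wn Hn ((Wn + 7) / 8) := by
  unfold create_test_bitmap
  simp only [pv_A_pixels]
  exact pv_A_encode Wn Hn

-- B computes the canonical grid of bytes (positive dimensions).
lemma pv_B (Wn Hn : Nat) :
    create_test_bitmap_alt (Wn : Int) (Hn : Int)
    = pvOut (Wn : Int) (Hn : Int) Wn Hn ((Wn + 7) / 8) := by
  have h8 : (8 : Int) = ((8 : Nat) : Int) := by norm_num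
  have hbpr : PySem.Int.floordiv ((Wn : Int) + 7) ((8 : Nat) : Int) = (((Wn + 7) / 8 : Nat) : Int) := by
    rw [show ((Wn : Int) + 7) = ((Wn + 7 : Nat) : Int) by push_cast; ring,
      PySem.Int.floordiv_natCast]
  unfold create_test_bitmap_alt
  simp only [h8, hbpr, PySem.List.pyRange_zero_natCast, List.foldl_map]
  rw [PySem.List.foldl_congr_mem (List.range Hn) _
    (fun (out : List Int) (y : Nat) =>
      out ++ (List.range ((Wn + 7) / 8)).map (pvByte (Wn : Int) (Hn : Int) Wn y)) []
    (by
      intro acc y hy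
      rw [PySem.List.foldl_congr_mem (List.range ((Wn + 7) / 8)) _
        (fun (out : List Int) (b : Nat) =>
          out ++ [pvByte (Wn : Int) (Hn : Int) Wn y b]) acc
        (by
          intro acc2 b hb
          congr 1
          congr 1
          unfold pvByte
          apply PySem.List.foldl_congr_mem
          intro v i hi
          rw [List.mem_range] at hi
          simp only [pvP, pvU, Bool.and_eq_true, decide_eq_true_eq]
          have hc : ((8 : Nat) : Int) * (b : Int) + (i : Int) = ((8 * b + i : Nat) : Int) := by
            push_cast; ring
          rw [hc]
          have ht : ((7 : Int) - (i : Int)).toNat = 7 - (8 * b + i) % 8 := by omega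
          simp only [Nat.cast_lt, ht])]
      exact PySem.List.foldl_append_singleton_eq_map _ _ _)]
  rw [PySem.List.foldl_append_eq_flatMap]
  rfl

-- Main case: both ports agree for positive dimensions.
lemma pv_main (width height : Int) (hw : 0 ≤ width) (hh : 0 ≤ height) :
    create_test_bitmap width height = create_test_bitmap_alt width height := by
  obtain ⟨Wn, rfl⟩ : ∃ n : Nat, width = (n : Int) :=
    ⟨width.toNat, (Int.toNat_of_nonneg (by omega)).symm⟩
  obtain ⟨Hn, rfl⟩ : ∃ n : Nat, height = (n : Int) :=
    ⟨height.toNat, (Int.toNat_of_nonneg (by omega)).symm⟩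
  rw [pv_A Wn Hn, pv_B Wn Hn]

-- With an empty buffer allocation A returns the empty list.
lemma pv_empty_A (width height : Int)
    (hz : (PySem.Int.floordiv (width + 7) 8 * height).toNat = 0)
    (h0 : width ≤ 0 ∨ height ≤ 0) :
    create_test_bitmap width height = [] := by
  unfold create_test_bitmap encode_pixel_array_to_bitmap
  rcases h0 with h | h
  · simp only [PySem.List.pyRange_one_eq_nil h, List.foldl_nil, pv_foldl_const,
      PySem.List.pyRepeat_singleton, hz, List.replicate_zero]
  · simp only [PySem.List.pyRange_one_eq_nil h, List.foldl_nil,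
      PySem.List.pyRepeat_singleton, hz, List.replicate_zero]

-- B returns the empty list whenever a loop bound is non-positive.
lemma pv_empty_B (width height : Int)
    (h0 : PySem.Int.floordiv (width + 7) 8 ≤ 0 ∨ height ≤ 0) :
    create_test_bitmap_alt width height = [] := by
  unfold create_test_bitmap_alt
  rcases h0 with h | h
  · simp only [PySem.List.pyRange_one_eq_nil h, List.foldl_nil, pv_foldl_const]
  · simp only [PySem.List.pyRange_one_eq_nil h, List.foldl_nil]

-- With no rows to process, A returns its freshly allocated zero buffer.
lemma pv_raw_A (width height : Int) (hh : height ≤ 0) :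
    create_test_bitmap width height
    = List.replicate (PySem.Int.floordiv (width + 7) 8 * height).toNat 0 := by
  unfold create_test_bitmap encode_pixel_array_to_bitmap
  simp only [PySem.List.pyRange_one_eq_nil hh, List.foldl_nil,
    PySem.List.pyRepeat_singleton]

-- ===== VERDICT (by name: the statement is the Claim_ definition above) =====
theorem create_test_bitmap_spec : Claim_unchanged_create_test_bitmap := by
  intro width height _
  unfold Spec_create_test_bitmap D_create_test_bitmap
  intro hD
  have hq : PySem.Int.floordiv (width + 7) 8 = (width + 7) / 8 :=
    PySem.Int.floordiv_eq_ediv_of_pos (by norm_num)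
  by_cases hw : 1 ≤ width
  · by_cases hh : 1 ≤ height
    · exact pv_main width height (by omega) (by omega)
    · have hh' : height ≤ 0 := by omega
      have hq0 : 0 ≤ (width + 7) / 8 := Int.ediv_nonneg (by omega) (by norm_num)
      have hz : (PySem.Int.floordiv (width + 7) 8 * height).toNat = 0 := by
        rw [hq]
        exact Int.toNat_of_nonpos (by nlinarith)
      rw [pv_empty_A width height hz (Or.inr hh'), pv_empty_B width height (Or.inr hh')]
  · have hw' : width ≤ 0 := by omega
    by_cases hh : 1 ≤ height
    · have hqle : PySem.Int.floordiv (width + 7) 8 ≤ 0 := by rw [hq]; omega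
      have hz : (PySem.Int.floordiv (width + 7) 8 * height).toNat = 0 := by
        rw [hq]
        rw [hq] at hqle
        exact Int.toNat_of_nonpos (by nlinarith)
      rw [pv_empty_A width height hz (Or.inl hw'), pv_empty_B width height (Or.inl hqle)]
    · have hh' : height ≤ 0 := by omega
      have hz : (PySem.Int.floordiv (width + 7) 8 * height).toNat = 0 := by
        rcases eq_or_lt_of_le hh' with h1 | h1
        · rw [h1, Int.mul_zero]; rfl
        · have hw7 : -7 ≤ width := by omega
          have hq0 : 0 ≤ (width + 7) / 8 := Int.ediv_nonneg (by omega) (by norm_num)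
          rw [hq]
          exact Int.toNat_of_nonpos (by nlinarith)
      rw [pv_empty_A width height hz (Or.inl hw'), pv_empty_B width height (Or.inr hh')]

theorem create_test_bitmap_changed : Claim_changed_create_test_bitmap := by
  unfold Claim_changed_create_test_bitmap; decide

theorem create_test_bitmap_tight : Claim_exact_create_test_bitmap := by
  intro width height _ hD
  obtain ⟨hw, hh⟩ := hD
  have hB : create_test_bitmap_alt width height = [] :=
    pv_empty_B width height (Or.inr (by omega))
  have hA := pv_raw_A width height (by omega)
  have hq : PySem.Int.floordiv (width + 7) 8 = (width + 7) / 8 :=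
    PySem.Int.floordiv_eq_ediv_of_pos (by norm_num)
  have hqneg : PySem.Int.floordiv (width + 7) 8 ≤ -1 := by rw [hq]; omega
  have hpos : 1 ≤ PySem.Int.floordiv (width + 7) 8 * height := by nlinarith
  intro hcontra
  rw [hA, hB] at hcontra
  have := congrArg List.length hcontra
  simp [List.length_replicate] at this
  rw [hq] at hpos
  omega
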